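-- pv_equiv track=rewrite | github.com/pypi-data/pypi-mirror-401 | packages/pthr-db-caller/pthr_db_caller-2.0.2.tar.gz/pthr_db_caller-2.0.2/pthr_db_caller/panther_tree_graph.py | extract_clade_name
-- ===== SOURCE A (Python) =====
-- def extract_clade_name(clade_comment):
--     if clade_comment is None:
--         clade_comment = ""
--     # Ex: &&NHX:Ev=0>1:S=Dictyostelium:ID=AN13  # family internal
--     # Ex: &&NHX:Ev=1>0:ID=AN32  # family leaf
--     # Ex: &&NHX:S=Endopterygota  # species internal
--     # Ex: HUMAN  # species leaf
--     new_comment = ""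
--     comment_bits = clade_comment.split(":")
--     for b in comment_bits:
--         if b.startswith("S="):
--             new_comment = b.replace("S=", "")
--             break
--     # Also grab ID
--     an_id = ""
--     for b in comment_bits:
--         if b.startswith("ID="):
--             an_id = b.replace("ID=", "")
--             break
--     ###
--     new_comment = new_comment.replace("&&NHX:S=", "")
--     new_comment = new_comment.replace("&&NXH:S=", "")
--     if new_comment == "Opisthokonts":
--         new_comment = "Opisthokonta"
--     return new_comment, an_id
-- ===== SOURCE B (Python) =====
-- def extract_clade_name(clade_comment):
--     # One pass, back to front: an earlier bit's assignment overwrites a later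
--     # one's, so the first matching bit wins, as in the break-on-first original.
--     name = ""
--     an_id = ""
--     for b in reversed((clade_comment or "").split(":")):
--         if b.startswith("S="):
--             name = b.replace("S=", "")
--         elif b.startswith("ID="):
--             an_id = b.replace("ID=", "")
--     name = name.replace("&&NHX:S=", "").replace("&&NXH:S=", "")
--     name = {"Opisthokonts": "Opisthokonta"}.get(name, name)
--     return name, an_id
-- ===== Notes on version B (the rewrite author's own statement) =====
-- stated objective: alternative
-- what changed: Replaces A's two forward break-on-first scans over the split bits with a single backward pass using overwriting accumulators (the first match wins because it is assigned last) and a dict-based remap of the final name.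
import Mathlib
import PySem

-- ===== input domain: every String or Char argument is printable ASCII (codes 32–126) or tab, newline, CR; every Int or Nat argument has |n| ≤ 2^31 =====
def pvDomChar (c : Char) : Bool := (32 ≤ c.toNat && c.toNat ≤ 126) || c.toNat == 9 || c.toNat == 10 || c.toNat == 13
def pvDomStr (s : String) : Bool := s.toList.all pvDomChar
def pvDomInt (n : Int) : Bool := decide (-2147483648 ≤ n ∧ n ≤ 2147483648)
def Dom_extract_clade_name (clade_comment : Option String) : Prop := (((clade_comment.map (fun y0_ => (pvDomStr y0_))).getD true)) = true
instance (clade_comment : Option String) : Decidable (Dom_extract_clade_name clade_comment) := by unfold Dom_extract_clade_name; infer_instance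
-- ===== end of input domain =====

-- B replaces A's two forward break-on-first scans by ONE backward pass over the split
-- bits with overwriting accumulators (the first matching bit wins because it is
-- assigned last) and a dict remap; same return value everywhere.

-- ===== PORT A =====
-- A's first loop: first bit starting with "S=", with "S=" replaced away ("" if none; break on first)
def pvLoopS : List String → String
  | [] => ""
  | b :: rest =>
    if PySem.Str.startswith b "S=" then PySem.Str.replace b "S=" "" else pvLoopS rest

-- A's second loop: same for "ID="
def pvLoopID : List String → String
  | [] => ""
  | b :: rest =>
    if PySem.Str.startswith b "ID=" then PySem.Str.replace b "ID=" "" else pvLoopID rest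

def extract_clade_name (clade_comment : Option String) : String × String :=
  let clade := clade_comment.getD ""
  -- split? is none only for sep = ""; the separator here is the literal ":"
  let comment_bits := (PySem.Str.split? clade ":").getD []
  let new_comment := pvLoopS comment_bits
  let an_id := pvLoopID comment_bits
  let new_comment := PySem.Str.replace new_comment "&&NHX:S=" ""
  let new_comment := PySem.Str.replace new_comment "&&NXH:S=" ""
  let new_comment := if new_comment = "Opisthokonts" then "Opisthokonta" else new_comment
  (new_comment, an_id)

-- ===== PORT B =====
-- body of B's single backward loop: state = (name, an_id), overwritten on a match
def pvBackStep (acc : String × String) (b : String) : String × String :=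
  if PySem.Str.startswith b "S=" then (PySem.Str.replace b "S=" "", acc.2)
  else if PySem.Str.startswith b "ID=" then (acc.1, PySem.Str.replace b "ID=" "")
  else acc

def extract_clade_name_alt (clade_comment : Option String) : String × String :=
  -- split? is none only for sep = ""; the separator here is the literal ":"
  let bits := (PySem.Str.split? (clade_comment.getD "") ":").getD []
  let st := bits.reverse.foldl pvBackStep ("", "")   -- for b in reversed(bits): ...
  let name := PySem.Str.replace (PySem.Str.replace st.1 "&&NHX:S=" "") "&&NXH:S=" ""
  let name := (PySem.Dict.empty.insert "Opisthokonts" "Opisthokonta").getD name name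
  (name, st.2)

-- ===== PRECONDITION & SPEC =====
def Spec_extract_clade_name (clade_comment : Option String) (out : String × String) : Prop := out = extract_clade_name_alt clade_comment
instance (clade_comment : Option String) (out : String × String) : Decidable (Spec_extract_clade_name clade_comment out) := by unfold Spec_extract_clade_name; infer_instance

-- ===== CLAIM (what is proved, stated in full; the proofs are below) =====
def Claim_equal_extract_clade_name : Prop := ∀ (clade_comment : Option String), Dom_extract_clade_name clade_comment → Spec_extract_clade_name clade_comment (extract_clade_name clade_comment)

-- ===== LEMMAS AND PROOFS =====

-- a string starting with "S=" does not start with "ID="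
lemma not_start_ID_of_start_S (b : String) (h : PySem.Chars.startswith b.toList ['S', '='] = true) :
    PySem.Chars.startswith b.toList ['I', 'D', '='] = false := by
  by_contra hne
  rw [Bool.not_eq_false] at hne
  rw [PySem.Chars.startswith_iff] at h hne
  rcases h with ⟨t1, h1⟩
  rcases hne with ⟨t2, h2⟩
  rw [← h1] at h2
  simp at h2

-- the backward overwrite pass computes exactly A's two first-match scans
lemma back_pass_eq (bits : List String) :
    bits.reverse.foldl pvBackStep ("", "") = (pvLoopS bits, pvLoopID bits) := by
  rw [List.foldl_reverse]
  induction bits with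
  | nil => rfl
  | cons b rest ih =>
    simp only [List.foldr_cons, ih]
    simp only [pvLoopS, pvLoopID, pvBackStep, PySem.Str.startswith_eq]
    by_cases hS : PySem.Chars.startswith b.toList ['S', '='] = true
    · simp [hS, not_start_ID_of_start_S b hS]
    · by_cases hID : PySem.Chars.startswith b.toList ['I', 'D', '='] = true
      · simp [hS, hID]
      · simp [hS, hID]

-- the singleton-dict remap is A's equality test
lemma remap_eq (n : String) :
    (PySem.Dict.empty.insert "Opisthokonts" "Opisthokonta").getD n n =
      if n = "Opisthokonts" then "Opisthokonta" else n := by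
  rw [PySem.Dict.getD_insert]
  split_ifs with h
  · rfl
  · exact PySem.Dict.getD_of_not_contains _ _ (by simp [PySem.Dict.contains_empty])

-- ===== VERDICT (by name: the statement is the Claim_ definition above) =====
theorem extract_clade_name_spec : Claim_equal_extract_clade_name := by
  intro clade_comment _
  unfold Spec_extract_clade_name
  simp only [extract_clade_name, extract_clade_name_alt, back_pass_eq, remap_eq]
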